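-- pv_equiv track=rewrite | github.com/vit-aborigen/CIO_woplugin | Bacteria Colonies.py | healthy
-- ===== SOURCE A (Python) =====
-- from collections import deque, Counter
--
-- def generate_perfect_colonies(max_len=9):
--     perfect_colonies = {}
--     for size in range(1, max_len):
--         perfect_colony = []
--         for i in range(-size, size + 1):
--             perfect_colony += [(i, j) for j in range(-size + abs(i), size - abs(i) + 1)]
--         perfect_colonies[len(perfect_colony)] = perfect_colony
--     return perfect_colonies
--
-- def start_new_colony(grid, start):
--     neighbours = [(1, 0), (-1, 0), (0, 1), (0, -1)]
--     colony = set([start])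
--     frontier = deque([start])
--
--     while frontier:
--         current_i, current_j = frontier.popleft()
--         for delta_i, delta_j in neighbours:
--             i, j = current_i + delta_i, current_j + delta_j
--             if (0 <= i < len(grid)) and (0 <= j < len(grid[0])) and grid[i][j] == 1 and ((i, j) not in colony):
--                 colony.add((i, j))
--                 frontier.append((i, j))
--     return colony
--
-- def is_bacteria_belong_to_any_colony(bacteria, colonies):
--     for colony in colonies:
--         if bacteria in colony:
--             return True
--     return False
--
-- def find_central_point_of_colony(colony):
--     x = Counter([dot[0] for dot in colony]).most_common()[0][0]
--     y = Counter([dot[1] for dot in colony]).most_common()[0][0]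
--     return [x, y]
--
-- def compare_colony_with_a_perfect_one(colony_to_compare, perfect_colony):
--     x, y = find_central_point_of_colony(colony_to_compare)
--     perfect_colony_adjusted = set([(i + x, j + y) for i,j in perfect_colony])
--     return not (perfect_colony_adjusted ^ colony_to_compare)
--
-- def healthy(grid):
--     h, w = len(grid), len(grid[0])
--     colonies = []
--     perfect_colonies = generate_perfect_colonies()
--     for i in range(h):
--         for j in range(w):
--             if grid[i][j] and not is_bacteria_belong_to_any_colony((i,j), colonies):
--                 colony = start_new_colony(grid, (i, j))
--                 if len(colony) in perfect_colonies.keys():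
--                     colonies.append(colony)
--
--     results = [colony for colony in colonies if compare_colony_with_a_perfect_one(colony, perfect_colonies[len(colony)])]
--     if results:
--         return find_central_point_of_colony(sorted(results, key=len, reverse=True)[0])
--     return [0,0]
-- ===== SOURCE B (Python) =====
-- from collections import deque
--
-- # radius r for each perfect-diamond size 2*r*r + 2*r + 1, r = 1..8
-- _R_OF_SIZE = {2 * r * r + 2 * r + 1: r for r in range(1, 9)}
--
--
-- def _flood(grid, start):
--     h, w = len(grid), len(grid[0])
--     colony = {start}
--     frontier = deque([start])
--     while frontier:
--         ci, cj = frontier.popleft()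
--         for di, dj in ((1, 0), (-1, 0), (0, 1), (0, -1)):
--             i, j = ci + di, cj + dj
--             if 0 <= i < h and 0 <= j < w and grid[i][j] == 1 and (i, j) not in colony:
--                 colony.add((i, j))
--                 frontier.append((i, j))
--     return colony
--
--
-- def healthy(grid):
--     h, w = len(grid), len(grid[0])
--     seen = set()
--     best_size = 0
--     best_center = None
--     for i in range(h):
--         for j in range(w):
--             if grid[i][j] and (i, j) not in seen:
--                 colony = _flood(grid, (i, j))
--                 r = _R_OF_SIZE.get(len(colony))
--                 if r is None:
--                     continue
--                 seen |= colony
--                 rows = [p[0] for p in colony]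
--                 cols = [p[1] for p in colony]
--                 cr, cc = min(rows) + r, min(cols) + r
--                 if (max(rows) - min(rows) == 2 * r
--                         and max(cols) - min(cols) == 2 * r
--                         and all(abs(pi - cr) + abs(pj - cc) <= r for pi, pj in colony)
--                         and len(colony) > best_size):
--                     best_size = len(colony)
--                     best_center = [cr, cc]
--     return best_center if best_center is not None else [0, 0]
-- ===== Notes on version B (the rewrite author's own statement) =====
-- stated objective: alternative
-- what changed: B keeps the per-cell flood fill but drops the perfect-colony template dictionary, the Counter-based center and the symmetric-difference comparison: each component of a candidate size is accepted by a bounding-box/size/diamond-membership arithmetic check around center (min_row+r, min_col+r), and the winner is kept in a running (best_size, best_center) accumulator instead of building, filtering and sorting a colony list.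
import Mathlib
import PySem

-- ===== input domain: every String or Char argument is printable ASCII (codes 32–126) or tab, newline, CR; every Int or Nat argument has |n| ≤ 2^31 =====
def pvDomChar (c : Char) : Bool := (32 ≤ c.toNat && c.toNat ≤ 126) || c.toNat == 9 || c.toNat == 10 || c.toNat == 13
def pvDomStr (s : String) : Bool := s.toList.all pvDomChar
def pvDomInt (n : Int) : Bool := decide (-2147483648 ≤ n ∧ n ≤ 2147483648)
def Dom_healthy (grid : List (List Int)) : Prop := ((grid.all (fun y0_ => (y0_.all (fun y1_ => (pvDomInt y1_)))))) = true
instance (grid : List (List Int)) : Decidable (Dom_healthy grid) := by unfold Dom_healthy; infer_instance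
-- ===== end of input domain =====

-- B replaces A's template-dictionary + Counter-center + symmetric-difference test by a per-component
-- bounding-box / size / diamond-membership arithmetic check and a running best accumulator (objective: alternative).

-- ===== SHARED HELPER =====
-- start_new_colony: the BFS flood fill, textually identical in Source A and Source B (Source B's `_flood`).
-- The fuel argument only makes the while-loop structurally total: each iteration pops one frontier
-- entry, and at most h*w+1 entries are ever pushed, so fuel h*w+1 is never exhausted.
def pvFloodLoop (grid : List (List Int)) (h w : Int) :
    Nat → List (Int × Int) → PySem.Set (Int × Int) → PySem.Set (Int × Int)
  | 0, _, colony => colony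
  | _ + 1, [], colony => colony
  | fuel + 1, cur :: frontier, colony =>
      let st := [((1 : Int), (0 : Int)), (-1, 0), (0, 1), (0, -1)].foldl
        (fun (st : PySem.Set (Int × Int) × List (Int × Int)) d =>
          let i := cur.1 + d.1
          let j := cur.2 + d.2
          if 0 ≤ i ∧ i < h ∧ 0 ≤ j ∧ j < w ∧
              PySem.List.pyGetD (PySem.List.pyGetD grid i []) j 0 = 1 ∧ ¬ (i, j) ∈ st.1
          then (PySem.Set.add st.1 (i, j), st.2 ++ [(i, j)])
          else st) (colony, frontier)
      pvFloodLoop grid h w fuel st.2 st.1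

def pvFlood (grid : List (List Int)) (start : Int × Int) : PySem.Set (Int × Int) :=
  let h := PySem.List.len grid
  let w := PySem.List.len (PySem.List.pyGetD grid 0 [])
  pvFloodLoop grid h w (grid.length * (PySem.List.pyGetD grid 0 []).length + 1)
    [start] (PySem.Set.add PySem.Set.empty start)

-- ===== PORT A =====
-- generate_perfect_colonies (max_len default 9)
def pvGenPerfect : PySem.Dict Int (List (Int × Int)) :=
  (PySem.List.pyRange 1 9).foldl (fun d size =>
      let pc := (PySem.List.pyRange (-size) (size + 1)).foldl
        (fun acc i => acc ++ (PySem.List.pyRange (-size + |i|) (size - |i| + 1)).map (fun j => (i, j))) []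
      d.insert (PySem.List.len pc) pc)
    PySem.Dict.empty

-- is_bacteria_belong_to_any_colony (the for-loop with early return True is List.any)
def pvBelong (bacteria : Int × Int) (colonies : List (PySem.Set (Int × Int))) : Bool :=
  colonies.any (fun colony => PySem.Set.contains colony bacteria)

-- Counter(l).most_common()[0][0]; most_common is the count-descending stable sort of the counter's
-- items; [0] is total here because every caller passes a nonempty list (a colony contains its start).
def pvMostCommon (l : List Int) : Int :=
  ((PySem.List.sorted (PySem.Dict.counter l).items (fun p => p.2) true).headD (0, 0)).1

-- find_central_point_of_colony, split into the pair (x, y) (the tuple unpacking in compare_…) and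
-- the returned two-element list.
def pvCentralPair (colony : PySem.Set (Int × Int)) : Int × Int :=
  (pvMostCommon (colony.map (fun dot => dot.1)), pvMostCommon (colony.map (fun dot => dot.2)))

def pvFindCentral (colony : PySem.Set (Int × Int)) : List Int :=
  [(pvCentralPair colony).1, (pvCentralPair colony).2]

-- compare_colony_with_a_perfect_one; `not (s ^ t)` is emptiness of the symmetric difference
def pvCompare (colonyToCompare : PySem.Set (Int × Int)) (perfectColony : List (Int × Int)) : Bool :=
  let c := pvCentralPair colonyToCompare
  let adjusted := PySem.Set.ofList (perfectColony.map (fun p => (p.1 + c.1, p.2 + c.2)))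
  (PySem.Set.symmDiff adjusted colonyToCompare).isEmpty

-- healthy; `sorted(results, key=len, reverse=True)[0]` — the [0] is total because it is guarded by
-- `if results`, ported as headD.
def healthy (grid : List (List Int)) : List Int :=
  let h := PySem.List.len grid
  let w := PySem.List.len (PySem.List.pyGetD grid 0 [])
  let perfectColonies := pvGenPerfect
  let colonies := (PySem.List.pyRange 0 h).foldl (fun cols i =>
      (PySem.List.pyRange 0 w).foldl (fun cols j =>
        if ¬ PySem.List.pyGetD (PySem.List.pyGetD grid i []) j 0 = 0 ∧ ¬ pvBelong (i, j) cols = true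
        then
          let colony := pvFlood grid (i, j)
          if perfectColonies.contains (PySem.List.len colony) then cols ++ [colony] else cols
        else cols) cols) []
  let results := colonies.filter
    (fun colony => pvCompare colony (perfectColonies.getD (PySem.List.len colony) []))
  if ¬ results = [] then
    pvFindCentral ((PySem.List.sorted results (fun c => PySem.List.len c) true).headD [])
  else [0, 0]

-- ===== PORT B =====
-- _R_OF_SIZE = {2*r*r + 2*r + 1: r for r in range(1, 9)}
def pvROfSize : PySem.Dict Int Int :=
  (PySem.List.pyRange 1 9).foldl (fun d r => d.insert (2 * r * r + 2 * r + 1) r) PySem.Dict.empty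

-- healthy (Source B): one pass keeping a seen-set and the running best (size, center);
-- min(..)/max(..) are total here because a colony always contains its start.
def healthy_alt (grid : List (List Int)) : List Int :=
  let h := PySem.List.len grid
  let w := PySem.List.len (PySem.List.pyGetD grid 0 [])
  let st := (PySem.List.pyRange 0 h).foldl (fun st i =>
      (PySem.List.pyRange 0 w).foldl (fun (st : PySem.Set (Int × Int) × Int × Option (List Int)) j =>
        let seen := st.1
        let bestSize := st.2.1
        let bestCenter := st.2.2
        if ¬ PySem.List.pyGetD (PySem.List.pyGetD grid i []) j 0 = 0 ∧ ¬ (i, j) ∈ seen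
        then
          let colony := pvFlood grid (i, j)
          match pvROfSize.get? (PySem.List.len colony) with
          | none => (seen, bestSize, bestCenter)
          | some r =>
            let seen' := PySem.Set.update seen colony
            let rows := colony.map (fun p => p.1)
            let cols := colony.map (fun p => p.2)
            let cr := (PySem.List.min? rows (fun x => x)).getD 0 + r
            let cc := (PySem.List.min? cols (fun x => x)).getD 0 + r
            if (PySem.List.max? rows (fun x => x)).getD 0 - (PySem.List.min? rows (fun x => x)).getD 0 = 2 * r ∧
               (PySem.List.max? cols (fun x => x)).getD 0 - (PySem.List.min? cols (fun x => x)).getD 0 = 2 * r ∧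
               colony.all (fun p => decide (|p.1 - cr| + |p.2 - cc| ≤ r)) = true ∧
               PySem.List.len colony > bestSize
            then (seen', PySem.List.len colony, some [cr, cc])
            else (seen', bestSize, bestCenter)
        else st) st) ((PySem.Set.empty : PySem.Set (Int × Int)), (0 : Int), (none : Option (List Int)))
  match st.2.2 with
  | some c => c
  | none => [0, 0]

-- ===== PRECONDITION & SPEC =====
-- Pre_ excludes exactly the inputs on which A raises IndexError: the empty grid (grid[0]) and grids
-- with a row shorter than the first row (the main loop indexes every row at all j < len(grid[0])).
def Pre_healthy (grid : List (List Int)) : Prop :=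
  grid ≠ [] ∧ ∀ row ∈ grid, (grid.headD []).length ≤ row.length
instance (grid : List (List Int)) : Decidable (Pre_healthy grid) := by unfold Pre_healthy; infer_instance

def pvWitness_healthy : List (List Int) := [[0, 1, 0], [1, 1, 1], [0, 1, 0]]

def Spec_healthy (grid : List (List Int)) (out : List Int) : Prop := out = healthy_alt grid
instance (grid : List (List Int)) (out : List Int) : Decidable (Spec_healthy grid out) := by unfold Spec_healthy; infer_instance

-- ===== CLAIM (what is proved, stated in full; the proofs are below) =====
def Claim_equal_healthy : Prop := ∀ (grid : List (List Int)), Dom_healthy grid → Pre_healthy grid → Spec_healthy grid (healthy grid)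

-- ===== LEMMAS AND PROOFS =====

-- ---- generic helpers ----

/-- Transfer a relation through two folds over the same list. -/
theorem pvFoldlRel {α σ τ : Type} (R : σ → τ → Prop) (f : σ → α → σ) (g : τ → α → τ)
    (l : List α) (s : σ) (t : τ) (hstep : ∀ s t x, x ∈ l → R s t → R (f s x) (g t x))
    (h0 : R s t) : R (l.foldl f s) (l.foldl g t) := by
  induction l generalizing s t with
  | nil => exact h0
  | cons x xs ih =>
      exact ih _ _ (fun s t y hy => hstep s t y (List.mem_cons_of_mem _ hy))
        (hstep s t x (List.mem_cons_self) h0)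

-- ---- the template (proof-side name for the list A's generate_perfect_colonies stores) ----

def pvTemplate (size : Int) : List (Int × Int) :=
  (PySem.List.pyRange (-size) (size + 1)).foldl
    (fun acc i => acc ++ (PySem.List.pyRange (-size + |i|) (size - |i| + 1)).map (fun j => (i, j))) []

theorem mem_pvTemplate (r : Int) (p : Int × Int) : p ∈ pvTemplate r ↔ |p.1| + |p.2| ≤ r := by
  unfold pvTemplate
  rw [PySem.List.foldl_append_eq_flatMap]
  simp only [List.nil_append, List.mem_flatMap, List.mem_map, PySem.List.mem_pyRange_one]
  constructor
  · rintro ⟨i, hi, j, hj, rfl⟩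
    dsimp only
    rcases abs_cases i with ⟨h1, h1'⟩ | ⟨h1, h1'⟩ <;> rcases abs_cases j with ⟨h2, h2'⟩ | ⟨h2, h2'⟩ <;>
      omega
  · intro h
    rcases abs_cases p.1 with ⟨h1, h1'⟩ | ⟨h1, h1'⟩ <;> rcases abs_cases p.2 with ⟨h2, h2'⟩ | ⟨h2, h2'⟩ <;>
      exact ⟨p.1, by omega, p.2, by omega, rfl⟩

def pvSizes : List Int := [5, 13, 25, 41, 61, 85, 113, 145]

set_option maxRecDepth 40000 in
theorem pvGen_keys : pvGenPerfect.keys = pvSizes := by decide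
set_option maxRecDepth 40000 in
theorem pvR_keys : pvROfSize.keys = pvSizes := by decide

-- per-radius decidable facts about the templates
def pvTFacts (r : Int) : Prop :=
  pvGenPerfect.getD (2 * r * r + 2 * r + 1) [] = pvTemplate r ∧
  pvROfSize.get? (2 * r * r + 2 * r + 1) = some r ∧
  (pvTemplate r).Nodup ∧
  (pvTemplate r).length = (2 * r * r + 2 * r + 1).toNat ∧
  (((pvTemplate r).map Prod.fst).count 0 = (2 * r + 1).toNat ∧
    ∀ d ∈ (pvTemplate r).map Prod.fst, d ≠ 0 → ((pvTemplate r).map Prod.fst).count d < (2 * r + 1).toNat) ∧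
  (((pvTemplate r).map Prod.snd).count 0 = (2 * r + 1).toNat ∧
    ∀ d ∈ (pvTemplate r).map Prod.snd, d ≠ 0 → ((pvTemplate r).map Prod.snd).count d < (2 * r + 1).toNat)

set_option maxRecDepth 100000 in
set_option maxRecDepth 100000 in
theorem pvTFacts_all : ∀ r ∈ ([1, 2, 3, 4, 5, 6, 7, 8] : List Int), pvTFacts r := by
  unfold pvTFacts; decide

theorem pvSize_cases (n : Int) (h : n ∈ pvSizes) :
    ∃ r, r ∈ ([1, 2, 3, 4, 5, 6, 7, 8] : List Int) ∧ n = 2 * r * r + 2 * r + 1 := by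
  simp only [pvSizes, List.mem_cons, List.not_mem_nil, or_false] at h
  rcases h with rfl|rfl|rfl|rfl|rfl|rfl|rfl|rfl
  · exact ⟨1, by decide, by decide⟩
  · exact ⟨2, by decide, by decide⟩
  · exact ⟨3, by decide, by decide⟩
  · exact ⟨4, by decide, by decide⟩
  · exact ⟨5, by decide, by decide⟩
  · exact ⟨6, by decide, by decide⟩
  · exact ⟨7, by decide, by decide⟩
  · exact ⟨8, by decide, by decide⟩

-- ---- flood-fill output is duplicate-free ----

theorem pvFloodLoop_nodup (grid : List (List Int)) (h w : Int) (fuel : Nat)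
    (frontier : List (Int × Int)) (colony : PySem.Set (Int × Int)) (hnd : colony.Nodup) :
    (pvFloodLoop grid h w fuel frontier colony).Nodup := by
  induction fuel generalizing frontier colony with
  | zero => exact hnd
  | succ n ih =>
      cases frontier with
      | nil => exact hnd
      | cons cur frontier =>
          rw [pvFloodLoop]
          apply ih
          have : ∀ (l : List (Int × Int)) (st : PySem.Set (Int × Int) × List (Int × Int)),
              st.1.Nodup →
              (l.foldl (fun (st : PySem.Set (Int × Int) × List (Int × Int)) d =>
                let i := cur.1 + d.1
                let j := cur.2 + d.2
                if 0 ≤ i ∧ i < h ∧ 0 ≤ j ∧ j < w ∧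
                    PySem.List.pyGetD (PySem.List.pyGetD grid i []) j 0 = 1 ∧ ¬ (i, j) ∈ st.1
                then (PySem.Set.add st.1 (i, j), st.2 ++ [(i, j)])
                else st) st).1.Nodup := by
            intro l
            induction l with
            | nil => intro st hst; exact hst
            | cons d ds ihd =>
                intro st hst
                simp only [List.foldl_cons]
                apply ihd
                dsimp only
                split
                · exact PySem.Set.nodup_add _ _ hst
                · exact hst
          exact this _ _ hnd

theorem pvFlood_nodup (grid : List (List Int)) (start : Int × Int) :
    (pvFlood grid start).Nodup := by
  unfold pvFlood
  exact pvFloodLoop_nodup _ _ _ _ _ _ (PySem.Set.nodup_add _ _ List.nodup_nil)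

-- ---- mostCommon of a list with a strict majority element ----

theorem pvMostCommon_eq (l : List Int) (a : Int) (ha : a ∈ l)
    (hmax : ∀ b, b ≠ a → l.count b < l.count a) : pvMostCommon l = a := by
  unfold pvMostCommon
  have hitems : (PySem.Dict.counter l).items
      = (PySem.Set.ofList l).map (fun k => (k, (l.count k : Int))) := by
    simpa using PySem.Dict.items_counter l
  have hne : (PySem.List.sorted (PySem.Dict.counter l).items (fun p => p.2) true) ≠ [] := by
    rw [Ne, PySem.List.sorted_eq_nil_iff, hitems, List.map_eq_nil_iff]
    intro hemp
    have : a ∈ PySem.Set.ofList l := (PySem.Set.mem_ofList ..).2 ha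
    rw [hemp] at this
    exact List.not_mem_nil this
  obtain ⟨m, t, hmt⟩ := List.exists_cons_of_ne_nil hne
  have hmax' := PySem.List.key_head_sorted_rev_ge _ _ hmt
  have hmem : m ∈ (PySem.Dict.counter l).items := by
    have : m ∈ PySem.List.sorted (PySem.Dict.counter l).items (fun p => p.2) true := by
      rw [hmt]; exact List.mem_cons_self
    exact (PySem.List.mem_sorted ..).1 this
  rw [hitems] at hmem
  obtain ⟨k, hk, rfl⟩ := List.mem_map.1 hmem
  have hka : k = a := by
    by_contra hne'
    have h1 : (l.count k : Int) < (l.count a : Int) := by exact_mod_cast hmax k hne'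
    have h2 : ((a, (l.count a : Int)) : Int × Int) ∈ (PySem.Dict.counter l).items := by
      rw [hitems]
      exact List.mem_map.2 ⟨a, (PySem.Set.mem_ofList _ _).2 ha, rfl⟩
    have := hmax' _ h2
    simp only at this
    omega
  rw [hmt, hka]
  rfl

-- ---- B's acceptance predicate and best-step, in proof-friendly form ----

def pvBacc (c : PySem.Set (Int × Int)) : Bool :=
  let r := (pvROfSize.get? (PySem.List.len c)).getD 0
  let rows := c.map (fun p => p.1)
  let cols := c.map (fun p => p.2)
  let cr := (PySem.List.min? rows (fun x => x)).getD 0 + r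
  let cc := (PySem.List.min? cols (fun x => x)).getD 0 + r
  decide ((PySem.List.max? rows (fun x => x)).getD 0 - (PySem.List.min? rows (fun x => x)).getD 0 = 2 * r) &&
  decide ((PySem.List.max? cols (fun x => x)).getD 0 - (PySem.List.min? cols (fun x => x)).getD 0 = 2 * r) &&
  c.all (fun p => decide (|p.1 - cr| + |p.2 - cc| ≤ r))

def pvBCenter (c : PySem.Set (Int × Int)) : List Int :=
  let r := (pvROfSize.get? (PySem.List.len c)).getD 0
  [(PySem.List.min? (c.map (fun p => p.1)) (fun x => x)).getD 0 + r,
   (PySem.List.min? (c.map (fun p => p.2)) (fun x => x)).getD 0 + r]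

def pvBStep (acc : Int × Option (List Int)) (c : PySem.Set (Int × Int)) : Int × Option (List Int) :=
  if pvBacc c = true ∧ PySem.List.len c > acc.1 then (PySem.List.len c, some (pvBCenter c)) else acc

def pvBest (cols : List (PySem.Set (Int × Int))) : Int × Option (List Int) :=
  cols.foldl pvBStep (0, none)

-- ---- the central equivalence for one colony ----

theorem mem_pvShift (r X Y : Int) (p : Int × Int) :
    p ∈ (pvTemplate r).map (fun q => (q.1 + X, q.2 + Y)) ↔ |p.1 - X| + |p.2 - Y| ≤ r := by
  simp only [List.mem_map, mem_pvTemplate]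
  constructor
  · rintro ⟨q, hq, rfl⟩
    dsimp only
    simpa using hq
  · intro h
    exact ⟨(p.1 - X, p.2 - Y), h, by simp⟩

theorem pvMin?_eq (l : List Int) (v : Int) (hv : v ∈ l) (hb : ∀ y ∈ l, v ≤ y) :
    PySem.List.min? l (fun x => x) = some v := by
  cases h : PySem.List.min? l (fun x => x) with
  | none =>
      rw [PySem.List.min?_eq_none_iff] at h
      rw [h] at hv
      exact absurd hv List.not_mem_nil
  | some m =>
      have h1 : m ≤ v := PySem.List.min?_isMin h v hv
      have h2 : v ≤ m := hb m (PySem.List.min?_mem h)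
      rw [le_antisymm h1 h2]

theorem pvMax?_eq (l : List Int) (v : Int) (hv : v ∈ l) (hb : ∀ y ∈ l, y ≤ v) :
    PySem.List.max? l (fun x => x) = some v := by
  cases h : PySem.List.max? l (fun x => x) with
  | none =>
      rw [PySem.List.max?_eq_none_iff] at h
      rw [h] at hv
      exact absurd hv List.not_mem_nil
  | some m =>
      have h1 : v ≤ m := PySem.List.max?_isMax h v hv
      have h2 : m ≤ v := hb m (PySem.List.max?_mem h)
      rw [le_antisymm h2 h1]

theorem pvCompare_true_iff (c : PySem.Set (Int × Int)) (r : Int) :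
    pvCompare c (pvTemplate r) = true ↔
      (∀ p : Int × Int, p ∈ c ↔ |p.1 - (pvCentralPair c).1| + |p.2 - (pvCentralPair c).2| ≤ r) := by
  unfold pvCompare
  rw [List.isEmpty_iff]
  rw [show ∀ (s t : PySem.Set (Int × Int)), PySem.Set.symmDiff s t = s.diff t ++ t.diff s
      from fun _ _ => rfl]
  rw [List.append_eq_nil_iff, List.eq_nil_iff_forall_not_mem, List.eq_nil_iff_forall_not_mem]
  simp only [PySem.Set.mem_diff, PySem.Set.mem_ofList, mem_pvShift, not_and, not_not]
  constructor
  · rintro ⟨h1, h2⟩ p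
    constructor
    · intro hp
      by_contra hd
      exact hd (h2 p hp)
    · intro hd
      exact h1 p hd
  · intro h
    exact ⟨fun a ha => (h a).2 ha, fun a ha => (h a).1 ha⟩

theorem pvDiamond_facts (c : PySem.Set (Int × Int)) (r X Y : Int) (hr : 1 ≤ r) (hnd : c.Nodup)
    (hTnd : (pvTemplate r).Nodup)
    (hcf0 : ((pvTemplate r).map Prod.fst).count 0 = (2 * r + 1).toNat)
    (hcflt : ∀ d ∈ (pvTemplate r).map Prod.fst, d ≠ 0 →
        ((pvTemplate r).map Prod.fst).count d < (2 * r + 1).toNat)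
    (hcs0 : ((pvTemplate r).map Prod.snd).count 0 = (2 * r + 1).toNat)
    (hcslt : ∀ d ∈ (pvTemplate r).map Prod.snd, d ≠ 0 →
        ((pvTemplate r).map Prod.snd).count d < (2 * r + 1).toNat)
    (H : ∀ p : Int × Int, p ∈ c ↔ |p.1 - X| + |p.2 - Y| ≤ r) :
    PySem.List.min? (c.map (fun p => p.1)) (fun x => x) = some (X - r) ∧
    PySem.List.max? (c.map (fun p => p.1)) (fun x => x) = some (X + r) ∧
    PySem.List.min? (c.map (fun p => p.2)) (fun x => x) = some (Y - r) ∧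
    PySem.List.max? (c.map (fun p => p.2)) (fun x => x) = some (Y + r) ∧
    pvMostCommon (c.map (fun p => p.1)) = X ∧
    pvMostCommon (c.map (fun p => p.2)) = Y := by
  have hbound : ∀ p : Int × Int, p ∈ c →
      X - r ≤ p.1 ∧ p.1 ≤ X + r ∧ Y - r ≤ p.2 ∧ p.2 ≤ Y + r := by
    intro p hp
    have := (H p).1 hp
    rcases abs_cases (p.1 - X) with ⟨h1, h1'⟩ | ⟨h1, h1'⟩ <;>
      rcases abs_cases (p.2 - Y) with ⟨h2, h2'⟩ | ⟨h2, h2'⟩ <;> omega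
  have hXmY : ((X - r, Y) : Int × Int) ∈ c := by
    rw [H]
    dsimp only
    rcases abs_cases ((X - r : Int) - X) with ⟨h1, h1'⟩ | ⟨h1, h1'⟩ <;>
      rcases abs_cases ((Y : Int) - Y) with ⟨h2, h2'⟩ | ⟨h2, h2'⟩ <;> omega
  have hXpY : ((X + r, Y) : Int × Int) ∈ c := by
    rw [H]
    dsimp only
    rcases abs_cases ((X + r : Int) - X) with ⟨h1, h1'⟩ | ⟨h1, h1'⟩ <;>
      rcases abs_cases ((Y : Int) - Y) with ⟨h2, h2'⟩ | ⟨h2, h2'⟩ <;> omega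
  have hXYm : ((X, Y - r) : Int × Int) ∈ c := by
    rw [H]
    dsimp only
    rcases abs_cases ((X : Int) - X) with ⟨h1, h1'⟩ | ⟨h1, h1'⟩ <;>
      rcases abs_cases ((Y - r : Int) - Y) with ⟨h2, h2'⟩ | ⟨h2, h2'⟩ <;> omega
  have hXYp : ((X, Y + r) : Int × Int) ∈ c := by
    rw [H]
    dsimp only
    rcases abs_cases ((X : Int) - X) with ⟨h1, h1'⟩ | ⟨h1, h1'⟩ <;>
      rcases abs_cases ((Y + r : Int) - Y) with ⟨h2, h2'⟩ | ⟨h2, h2'⟩ <;> omega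
  have hXY : ((X, Y) : Int × Int) ∈ c := by
    rw [H]
    dsimp only
    rcases abs_cases ((X : Int) - X) with ⟨h1, h1'⟩ | ⟨h1, h1'⟩ <;>
      rcases abs_cases ((Y : Int) - Y) with ⟨h2, h2'⟩ | ⟨h2, h2'⟩ <;> omega
  -- the permutation with the shifted template
  have hSnd : ((pvTemplate r).map (fun q => (q.1 + X, q.2 + Y))).Nodup :=
    hTnd.map (fun a b hab => by
      have h1 : a.1 + X = b.1 + X := congrArg Prod.fst hab
      have h2 : a.2 + Y = b.2 + Y := congrArg Prod.snd hab
      exact Prod.ext (by omega) (by omega))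
  have hperm : c.Perm ((pvTemplate r).map (fun q => (q.1 + X, q.2 + Y))) := by
    rw [List.perm_ext_iff_of_nodup hnd hSnd]
    intro p
    rw [H, mem_pvShift]
  have hrowperm : (c.map (fun p => p.1)).Perm (((pvTemplate r).map Prod.fst).map (· + X)) := by
    have := hperm.map (fun p => p.1)
    simpa [List.map_map, Function.comp] using this
  have hcolperm : (c.map (fun p => p.2)).Perm (((pvTemplate r).map Prod.snd).map (· + Y)) := by
    have := hperm.map (fun p => p.2)
    simpa [List.map_map, Function.comp] using this
  have hcount : ∀ b : Int, (c.map (fun p => p.1)).count b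
      = ((pvTemplate r).map Prod.fst).count (b - X) := by
    intro b
    rw [hrowperm.count_eq]
    have := List.count_map_of_injective ((pvTemplate r).map Prod.fst) (· + X)
      (fun a b h => by dsimp at h; omega) (b - X)
    simpa using this
  have hcountc : ∀ b : Int, (c.map (fun p => p.2)).count b
      = ((pvTemplate r).map Prod.snd).count (b - Y) := by
    intro b
    rw [hcolperm.count_eq]
    have := List.count_map_of_injective ((pvTemplate r).map Prod.snd) (· + Y)
      (fun a b h => by dsimp at h; omega) (b - Y)
    simpa using this
  refine ⟨?_, ?_, ?_, ?_, ?_, ?_⟩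
  · exact pvMin?_eq _ _ (List.mem_map.2 ⟨_, hXmY, rfl⟩)
      (fun y hy => by obtain ⟨p, hp, rfl⟩ := List.mem_map.1 hy; exact (hbound p hp).1)
  · exact pvMax?_eq _ _ (List.mem_map.2 ⟨_, hXpY, rfl⟩)
      (fun y hy => by obtain ⟨p, hp, rfl⟩ := List.mem_map.1 hy; exact (hbound p hp).2.1)
  · exact pvMin?_eq _ _ (List.mem_map.2 ⟨_, hXYm, rfl⟩)
      (fun y hy => by obtain ⟨p, hp, rfl⟩ := List.mem_map.1 hy; exact (hbound p hp).2.2.1)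
  · exact pvMax?_eq _ _ (List.mem_map.2 ⟨_, hXYp, rfl⟩)
      (fun y hy => by obtain ⟨p, hp, rfl⟩ := List.mem_map.1 hy; exact (hbound p hp).2.2.2)
  · refine pvMostCommon_eq _ _ (List.mem_map.2 ⟨_, hXY, rfl⟩) ?_
    intro b hb
    rw [hcount b, hcount X, sub_self, hcf0]
    by_cases hmem : b - X ∈ (pvTemplate r).map Prod.fst
    · exact hcflt _ hmem (by omega)
    · rw [List.count_eq_zero_of_not_mem hmem]; omega
  · refine pvMostCommon_eq _ _ (List.mem_map.2 ⟨_, hXY, rfl⟩) ?_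
    intro b hb
    rw [hcountc b, hcountc Y, sub_self, hcs0]
    by_cases hmem : b - Y ∈ (pvTemplate r).map Prod.snd
    · exact hcslt _ hmem (by omega)
    · rw [List.count_eq_zero_of_not_mem hmem]; omega

theorem pvContained_diamond (c : PySem.Set (Int × Int)) (r cr cc : Int) (hnd : c.Nodup)
    (hTnd : (pvTemplate r).Nodup)
    (hTlen : (pvTemplate r).length = (2 * r * r + 2 * r + 1).toNat)
    (hclen : c.length = (2 * r * r + 2 * r + 1).toNat)
    (hall : ∀ p : Int × Int, p ∈ c → |p.1 - cr| + |p.2 - cc| ≤ r) :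
    ∀ p : Int × Int, p ∈ c ↔ |p.1 - cr| + |p.2 - cc| ≤ r := by
  have hSnd : ((pvTemplate r).map (fun q => (q.1 + cr, q.2 + cc))).Nodup :=
    hTnd.map (fun a b hab => by
      have h1 : a.1 + cr = b.1 + cr := congrArg Prod.fst hab
      have h2 : a.2 + cc = b.2 + cc := congrArg Prod.snd hab
      exact Prod.ext (by omega) (by omega))
  have hsub : c ⊆ (pvTemplate r).map (fun q => (q.1 + cr, q.2 + cc)) := by
    intro p hp
    exact (mem_pvShift r cr cc p).2 (hall p hp)
  have hperm := (hnd.subperm hsub).perm_of_length_le (by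
    rw [List.length_map, hTlen, hclen])
  intro p
  rw [hperm.mem_iff, mem_pvShift]

theorem pvAccept (c : PySem.Set (Int × Int)) (hnd : c.Nodup)
    (hsz : pvGenPerfect.contains (PySem.List.len c) = true) :
    (pvCompare c (pvGenPerfect.getD (PySem.List.len c) []) = pvBacc c) ∧
    (pvBacc c = true → pvFindCentral c = pvBCenter c) := by
  have hmem : PySem.List.len c ∈ pvSizes := by
    rw [PySem.Dict.contains_eq_decide_mem_keys, pvGen_keys] at hsz
    exact of_decide_eq_true hsz
  obtain ⟨r, hrmem, hn⟩ := pvSize_cases _ hmem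
  obtain ⟨hgetD, hget?, hTnd, hTlen, ⟨hcf0, hcflt⟩, hcs0, hcslt⟩ := pvTFacts_all r hrmem
  have hr1 : 1 ≤ r := by
    simp only [List.mem_cons, List.not_mem_nil, or_false] at hrmem
    rcases hrmem with rfl | rfl | rfl | rfl | rfl | rfl | rfl | rfl <;> decide
  have hclen : c.length = (2 * r * r + 2 * r + 1).toNat := by
    have h1 : (c.length : Int) = 2 * r * r + 2 * r + 1 := by
      rw [← PySem.List.len_eq, hn]
    omega
  have hrr : (pvROfSize.get? (PySem.List.len c)).getD 0 = r := by
    rw [hn, hget?]; rfl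
  have hgetD' : pvGenPerfect.getD (PySem.List.len c) [] = pvTemplate r := by
    rw [hn, hgetD]
  rw [hgetD']
  -- unfold pvBacc into its three conjuncts
  have hbacc : pvBacc c = true ↔
      ((PySem.List.max? (c.map (fun p => p.1)) (fun x => x)).getD 0
          - (PySem.List.min? (c.map (fun p => p.1)) (fun x => x)).getD 0 = 2 * r ∧
        (PySem.List.max? (c.map (fun p => p.2)) (fun x => x)).getD 0
          - (PySem.List.min? (c.map (fun p => p.2)) (fun x => x)).getD 0 = 2 * r ∧
        ∀ p ∈ c, |p.1 - ((PySem.List.min? (c.map (fun p => p.1)) (fun x => x)).getD 0 + r)|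
          + |p.2 - ((PySem.List.min? (c.map (fun p => p.2)) (fun x => x)).getD 0 + r)| ≤ r) := by
    simp only [pvBacc, hrr, Bool.and_eq_true, decide_eq_true_eq, List.all_eq_true, and_assoc]
  have hCtoB : pvCompare c (pvTemplate r) = true → pvBacc c = true := by
    intro hcmp
    have H := (pvCompare_true_iff c r).1 hcmp
    obtain ⟨hminf, hmaxf, hmins, hmaxs, hmcf, hmcs⟩ :=
      pvDiamond_facts c r _ _ hr1 hnd hTnd hcf0 hcflt hcs0 hcslt H
    rw [hbacc, hminf, hmaxf, hmins, hmaxs]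
    refine ⟨by simp; omega, by simp; omega, ?_⟩
    intro p hp
    have := (H p).1 hp
    simp only [Option.getD_some]
    have e1 : (pvCentralPair c).1 - r + r = (pvCentralPair c).1 := by omega
    rw [e1]
    have e2 : (pvCentralPair c).2 - r + r = (pvCentralPair c).2 := by omega
    rw [e2]
    exact this
  have hBtoC : pvBacc c = true → (pvCompare c (pvTemplate r) = true ∧ pvFindCentral c = pvBCenter c) := by
    intro hb
    obtain ⟨hbb1, hbb2, hball⟩ := hbacc.1 hb
    set cr := (PySem.List.min? (c.map (fun p => p.1)) (fun x => x)).getD 0 + r with hcr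
    set cc := (PySem.List.min? (c.map (fun p => p.2)) (fun x => x)).getD 0 + r with hcc
    have H := pvContained_diamond c r cr cc hnd hTnd hTlen hclen hball
    obtain ⟨hminf, hmaxf, hmins, hmaxs, hmcf, hmcs⟩ :=
      pvDiamond_facts c r cr cc hr1 hnd hTnd hcf0 hcflt hcs0 hcslt H
    have hpair : pvCentralPair c = (cr, cc) := by
      unfold pvCentralPair
      rw [hmcf, hmcs]
    constructor
    · rw [pvCompare_true_iff c r, hpair]
      exact H
    · unfold pvFindCentral pvBCenter
      rw [hpair, hrr, hminf, hmins]
      simp only [Option.getD_some, List.cons.injEq, and_true]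
      exact ⟨by omega, by omega⟩
  constructor
  · rw [Bool.eq_iff_iff]
    exact ⟨hCtoB, fun hb => (hBtoC hb).1⟩
  · exact fun hb => (hBtoC hb).2

-- ---- selection: head of the stable descending sort vs the running strict-max fold ----

theorem insertBy_cons {α : Type} (before : α → α → Bool) (x y : α) (ys : List α) :
    PySem.List.insertBy before x (y :: ys) =
      if before x y then x :: y :: ys else y :: PySem.List.insertBy before x ys := rfl

theorem insertBy_nil {α : Type} (before : α → α → Bool) (x : α) :
    PySem.List.insertBy before x [] = [x] := rfl

theorem pvSorted_rev_headD {α : Type} (key : α → Int) (x : α) (t : List α) (d : α) :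
    (PySem.List.sorted (x :: t) key true).headD d =
      t.foldl (fun w c => if key w < key c then c else w) x := by
  rw [PySem.List.sorted_rev_eq_foldl_insertBy]
  simp only [List.foldl_cons, insertBy_nil]
  -- invariant: foldl over t from a nonempty acc has head = champion fold from acc's head
  suffices h : ∀ (t : List α) (acc : List α) (y : α) (ys : List α), acc = y :: ys →
      (t.foldl (fun acc x => PySem.List.insertBy (fun a b => decide (key b < key a)) x acc) acc).headD d
        = t.foldl (fun w c => if key w < key c then c else w) y by
    exact h t [x] x [] rfl
  intro t
  induction t with
  | nil => rintro acc y ys rfl; rfl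
  | cons c cs ih =>
      rintro acc y ys rfl
      simp only [List.foldl_cons, insertBy_cons]
      by_cases hc : key y < key c
      · rw [if_pos (by simpa using hc), if_pos hc]
        exact ih _ c _ rfl
      · rw [if_neg (by simpa using hc), if_neg hc]
        exact ih _ y _ rfl

theorem pvBestfold_firstmax {α : Type} (key : α → Int) (B : α → List Int) (x : α) (t : List α)
    (hx : 0 < key x) :
    (x :: t).foldl (fun (acc : Int × Option (List Int)) c =>
        if key c > acc.1 then (key c, some (B c)) else acc) (0, none) =
      (key (t.foldl (fun w c => if key w < key c then c else w) x),
       some (B (t.foldl (fun w c => if key w < key c then c else w) x))) := by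
  simp only [List.foldl_cons, gt_iff_lt]
  rw [if_pos hx]
  clear hx
  induction t generalizing x with
  | nil => rfl
  | cons c cs ih =>
      simp only [List.foldl_cons]
      by_cases hc : key x < key c
      · rw [if_pos hc, if_pos hc]
        exact ih c
      · rw [if_neg hc, if_neg hc]
        exact ih x

-- ---- the loop invariant ----

def pvRel (_grid : List (List Int)) (cols : List (PySem.Set (Int × Int)))
    (st : PySem.Set (Int × Int) × Int × Option (List Int)) : Prop :=
  (∀ p, p ∈ st.1 ↔ ∃ c ∈ cols, p ∈ c) ∧
  (∀ c ∈ cols, c.Nodup ∧ pvGenPerfect.contains (PySem.List.len c) = true) ∧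
  st.2 = pvBest cols

theorem pvBStep_eq (acc : Int × Option (List Int)) (c : PySem.Set (Int × Int)) :
    pvBStep acc c = if pvBacc c = true then
        (if PySem.List.len c > acc.1 then (PySem.List.len c, some (pvBCenter c)) else acc)
      else acc := by
  unfold pvBStep
  by_cases h : pvBacc c = true <;> simp [h]

theorem pvChampion_mem {α : Type} (key : α → Int) (x : α) (t : List α) :
    t.foldl (fun w c => if key w < key c then c else w) x ∈ x :: t := by
  induction t generalizing x with
  | nil => exact List.mem_cons_self
  | cons c cs ih =>
      simp only [List.foldl_cons]
      by_cases h : key x < key c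
      · rw [if_pos h]
        exact List.mem_cons_of_mem _ (ih c)
      · rw [if_neg h]
        rcases List.mem_cons.1 (ih x) with h' | h'
        · exact List.mem_cons.2 (Or.inl h')
        · exact List.mem_cons_of_mem _ (List.mem_cons_of_mem _ h')

theorem pvSizes_pos : ∀ n ∈ pvSizes, 0 < n := by decide

theorem pvTail_eq (cols : List (PySem.Set (Int × Int)))
    (hc : ∀ c ∈ cols, c.Nodup ∧ pvGenPerfect.contains (PySem.List.len c) = true) :
    (if ¬ cols.filter
        (fun colony => pvCompare colony (pvGenPerfect.getD (PySem.List.len colony) [])) = [] then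
      pvFindCentral ((PySem.List.sorted
        (cols.filter (fun colony => pvCompare colony (pvGenPerfect.getD (PySem.List.len colony) [])))
        (fun c => PySem.List.len c) true).headD [])
    else [0, 0]) =
    (match (pvBest cols).2 with
      | some c => c
      | none => [0, 0]) := by
  have hfilt : cols.filter
      (fun colony => pvCompare colony (pvGenPerfect.getD (PySem.List.len colony) []))
      = cols.filter (fun c => pvBacc c) :=
    List.filter_congr (fun c hcmem => (pvAccept c (hc c hcmem).1 (hc c hcmem).2).1)
  rw [hfilt]
  have hbest : pvBest cols = (cols.filter (fun c => pvBacc c)).foldl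
      (fun acc c => if PySem.List.len c > acc.1 then (PySem.List.len c, some (pvBCenter c)) else acc)
      (0, none) := by
    unfold pvBest
    rw [show pvBStep = (fun (acc : Int × Option (List Int)) c => if pvBacc c = true then
        (if PySem.List.len c > acc.1 then (PySem.List.len c, some (pvBCenter c)) else acc)
        else acc) from funext fun acc => funext fun c => pvBStep_eq acc c]
    exact PySem.List.foldl_if_eq_foldl_filter _ _ _ _
  rw [hbest]
  cases hres : cols.filter (fun c => pvBacc c) with
  | nil => simp
  | cons x t =>
      have hxmem : ∀ y ∈ x :: t, y ∈ cols ∧ pvBacc y = true := by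
        rw [← hres]
        intro y hy
        exact ⟨List.mem_of_mem_filter hy, List.of_mem_filter hy⟩
      have hxpos : 0 < PySem.List.len x := by
        have hcon := (hc x (hxmem x List.mem_cons_self).1).2
        rw [PySem.Dict.contains_eq_decide_mem_keys, pvGen_keys] at hcon
        exact pvSizes_pos _ (of_decide_eq_true hcon)
      rw [if_pos (by simp)]
      rw [pvSorted_rev_headD (fun c => PySem.List.len c) x t []]
      rw [pvBestfold_firstmax (fun c => PySem.List.len c) pvBCenter x t hxpos]
      obtain ⟨hwc, hwb⟩ := hxmem _ (pvChampion_mem (fun c => PySem.List.len c) x t)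
      exact (pvAccept _ (hc _ hwc).1 (hc _ hwc).2).2 hwb

-- ===== VERDICT (by name: the statement is the Claim_ definition above) =====
theorem pvContains_eq (n : Int) : pvROfSize.contains n = pvGenPerfect.contains n := by
  rw [PySem.Dict.contains_eq_decide_mem_keys, PySem.Dict.contains_eq_decide_mem_keys,
    pvGen_keys, pvR_keys]

theorem pvCellStep (grid : List (List Int)) (i j : Int) (cols : List (PySem.Set (Int × Int)))
    (st : PySem.Set (Int × Int) × Int × Option (List Int)) (hrel : pvRel grid cols st) :
    pvRel grid
      (if ¬PySem.List.pyGetD (PySem.List.pyGetD grid i []) j 0 = 0 ∧ ¬pvBelong (i, j) cols = true then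
          if pvGenPerfect.contains (PySem.List.len (pvFlood grid (i, j))) = true then
            cols ++ [pvFlood grid (i, j)]
          else cols
        else cols)
      (if ¬PySem.List.pyGetD (PySem.List.pyGetD grid i []) j 0 = 0 ∧ (i, j) ∉ st.1 then
          match pvROfSize.get? (PySem.List.len (pvFlood grid (i, j))) with
          | none => (st.1, st.2.1, st.2.2)
          | some r =>
            if (PySem.List.max? (List.map (fun p => p.1) (pvFlood grid (i, j))) fun x => x).getD 0 -
                  (PySem.List.min? (List.map (fun p => p.1) (pvFlood grid (i, j))) fun x => x).getD 0 = 2 * r ∧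
                (PySem.List.max? (List.map (fun p => p.2) (pvFlood grid (i, j))) fun x => x).getD 0 -
                  (PySem.List.min? (List.map (fun p => p.2) (pvFlood grid (i, j))) fun x => x).getD 0 = 2 * r ∧
                (List.all (pvFlood grid (i, j)) fun p =>
                  decide (|p.1 - ((PySem.List.min? (List.map (fun p => p.1) (pvFlood grid (i, j))) fun x => x).getD 0 + r)| +
                    |p.2 - ((PySem.List.min? (List.map (fun p => p.2) (pvFlood grid (i, j))) fun x => x).getD 0 + r)| ≤ r)) = true ∧
                PySem.List.len (pvFlood grid (i, j)) > st.2.1 then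
              (st.1.update (pvFlood grid (i, j)), PySem.List.len (pvFlood grid (i, j)),
                some [(PySem.List.min? (List.map (fun p => p.1) (pvFlood grid (i, j))) fun x => x).getD 0 + r,
                  (PySem.List.min? (List.map (fun p => p.2) (pvFlood grid (i, j))) fun x => x).getD 0 + r])
            else (st.1.update (pvFlood grid (i, j)), st.2.1, st.2.2)
        else st) := by
  obtain ⟨h1, h2, h3⟩ := hrel
  have hb : (pvBelong (i, j) cols = true) ↔ (i, j) ∈ st.1 := by
    simp only [pvBelong, List.any_eq_true, PySem.Set.contains_iff]
    exact (h1 (i, j)).symm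
  by_cases hcond : ¬PySem.List.pyGetD (PySem.List.pyGetD grid i []) j 0 = 0 ∧ ¬pvBelong (i, j) cols = true
  · have hcondB : ¬PySem.List.pyGetD (PySem.List.pyGetD grid i []) j 0 = 0 ∧ (i, j) ∉ st.1 :=
      ⟨hcond.1, fun hm => hcond.2 (hb.2 hm)⟩
    have hnd := pvFlood_nodup grid (i, j)
    by_cases hct : pvGenPerfect.contains (PySem.List.len (pvFlood grid (i, j))) = true
    · rw [if_pos hcond, if_pos hct, if_pos hcondB]
      -- the size is one of the perfect sizes; B's table lookup succeeds with some radius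
      have hmem : PySem.List.len (pvFlood grid (i, j)) ∈ pvSizes := by
        rw [PySem.Dict.contains_eq_decide_mem_keys, pvGen_keys] at hct
        exact of_decide_eq_true hct
      obtain ⟨r, hrmem, hn⟩ := pvSize_cases _ hmem
      obtain ⟨_, hget?, _, _, _, _⟩ := pvTFacts_all r hrmem
      have hget?' : pvROfSize.get? (PySem.List.len (pvFlood grid (i, j))) = some r := by
        rw [hn]; exact hget?
      rw [hget?']
      dsimp only
      have hrr : (pvROfSize.get? (PySem.List.len (pvFlood grid (i, j)))).getD 0 = r := by
        rw [hget?']; rfl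
      have hmem1 : ∀ p, p ∈ st.1.update (pvFlood grid (i, j)) ↔
          ∃ c ∈ cols ++ [pvFlood grid (i, j)], p ∈ c := by
        intro p
        rw [PySem.Set.mem_update, h1 p]
        constructor
        · rintro (⟨c, hc, hpc⟩ | hp)
          · exact ⟨c, List.mem_append.2 (Or.inl hc), hpc⟩
          · exact ⟨_, List.mem_append.2 (Or.inr List.mem_cons_self), hp⟩
        · rintro ⟨c, hc, hpc⟩
          rcases List.mem_append.1 hc with h | h
          · exact Or.inl ⟨c, h, hpc⟩
          · rw [List.mem_singleton] at h
            subst h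
            exact Or.inr hpc
      have hmem2 : ∀ c ∈ cols ++ [pvFlood grid (i, j)],
          c.Nodup ∧ pvGenPerfect.contains (PySem.List.len c) = true := by
        intro c hc
        rcases List.mem_append.1 hc with h | h
        · exact h2 c h
        · rw [List.mem_singleton] at h
          subst h
          exact ⟨hnd, hct⟩
      have hbestapp : pvBest (cols ++ [pvFlood grid (i, j)]) = pvBStep st.2 (pvFlood grid (i, j)) := by
        unfold pvBest
        rw [List.foldl_append]
        simp only [List.foldl_cons, List.foldl_nil]
        rw [h3]
        rfl
      have hbaccIff : pvBacc (pvFlood grid (i, j)) = true ↔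
          ((PySem.List.max? (List.map (fun p => p.1) (pvFlood grid (i, j))) fun x => x).getD 0 -
            (PySem.List.min? (List.map (fun p => p.1) (pvFlood grid (i, j))) fun x => x).getD 0 = 2 * r ∧
          (PySem.List.max? (List.map (fun p => p.2) (pvFlood grid (i, j))) fun x => x).getD 0 -
            (PySem.List.min? (List.map (fun p => p.2) (pvFlood grid (i, j))) fun x => x).getD 0 = 2 * r ∧
          (List.all (pvFlood grid (i, j)) fun p =>
            decide (|p.1 - ((PySem.List.min? (List.map (fun p => p.1) (pvFlood grid (i, j))) fun x => x).getD 0 + r)| +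
              |p.2 - ((PySem.List.min? (List.map (fun p => p.2) (pvFlood grid (i, j))) fun x => x).getD 0 + r)| ≤ r)) = true) := by
        simp only [pvBacc, hrr, Bool.and_eq_true, decide_eq_true_eq, and_assoc]
      by_cases hcd : ((PySem.List.max? (List.map (fun p => p.1) (pvFlood grid (i, j))) fun x => x).getD 0 -
            (PySem.List.min? (List.map (fun p => p.1) (pvFlood grid (i, j))) fun x => x).getD 0 = 2 * r ∧
          (PySem.List.max? (List.map (fun p => p.2) (pvFlood grid (i, j))) fun x => x).getD 0 -
            (PySem.List.min? (List.map (fun p => p.2) (pvFlood grid (i, j))) fun x => x).getD 0 = 2 * r ∧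
          (List.all (pvFlood grid (i, j)) fun p =>
            decide (|p.1 - ((PySem.List.min? (List.map (fun p => p.1) (pvFlood grid (i, j))) fun x => x).getD 0 + r)| +
              |p.2 - ((PySem.List.min? (List.map (fun p => p.2) (pvFlood grid (i, j))) fun x => x).getD 0 + r)| ≤ r)) = true ∧
          PySem.List.len (pvFlood grid (i, j)) > st.2.1)
      · rw [if_pos hcd]
        refine ⟨hmem1, hmem2, ?_⟩
        rw [hbestapp]
        unfold pvBStep
        rw [if_pos ⟨hbaccIff.2 ⟨hcd.1, hcd.2.1, hcd.2.2.1⟩, hcd.2.2.2⟩]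
        unfold pvBCenter
        rw [hrr]
      · rw [if_neg hcd]
        refine ⟨hmem1, hmem2, ?_⟩
        rw [hbestapp]
        unfold pvBStep
        rw [if_neg (fun hx => hcd ⟨(hbaccIff.1 hx.1).1, (hbaccIff.1 hx.1).2.1, (hbaccIff.1 hx.1).2.2, hx.2⟩)]
    · rw [if_pos hcond, if_neg hct, if_pos hcondB]
      have hnone : pvROfSize.get? (PySem.List.len (pvFlood grid (i, j))) = none := by
        rw [PySem.Dict.get?_eq_none_iff_contains, pvContains_eq]
        exact Bool.not_eq_true _ ▸ hct
      rw [hnone]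
      exact ⟨h1, h2, h3⟩
  · rw [if_neg hcond, if_neg (fun hg => hcond ⟨hg.1, fun hm => hg.2 (hb.1 hm)⟩)]
    exact ⟨h1, h2, h3⟩

theorem healthy_spec : Claim_equal_healthy := by
  intro grid hdom hpre
  unfold Spec_healthy
  show healthy grid = healthy_alt grid
  simp only [healthy, healthy_alt]
  have hrel := pvFoldlRel (pvRel grid)
    (fun cols i =>
      List.foldl
        (fun cols j =>
          if ¬PySem.List.pyGetD (PySem.List.pyGetD grid i []) j 0 = 0 ∧ ¬pvBelong (i, j) cols = true then
            if pvGenPerfect.contains (PySem.List.len (pvFlood grid (i, j))) = true then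
              cols ++ [pvFlood grid (i, j)]
            else cols
          else cols)
        cols (PySem.List.pyRange 0 (PySem.List.len (PySem.List.pyGetD grid 0 []))))
    (fun st i =>
      List.foldl
        (fun (st : PySem.Set (Int × Int) × Int × Option (List Int)) j =>
          if ¬PySem.List.pyGetD (PySem.List.pyGetD grid i []) j 0 = 0 ∧ (i, j) ∉ st.1 then
            match pvROfSize.get? (PySem.List.len (pvFlood grid (i, j))) with
            | none => (st.1, st.2.1, st.2.2)
            | some r =>
              if (PySem.List.max? (List.map (fun p => p.1) (pvFlood grid (i, j))) fun x => x).getD 0 -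
                    (PySem.List.min? (List.map (fun p => p.1) (pvFlood grid (i, j))) fun x => x).getD 0 = 2 * r ∧
                  (PySem.List.max? (List.map (fun p => p.2) (pvFlood grid (i, j))) fun x => x).getD 0 -
                    (PySem.List.min? (List.map (fun p => p.2) (pvFlood grid (i, j))) fun x => x).getD 0 = 2 * r ∧
                  (List.all (pvFlood grid (i, j)) fun p =>
                    decide (|p.1 - ((PySem.List.min? (List.map (fun p => p.1) (pvFlood grid (i, j))) fun x => x).getD 0 + r)| +
                      |p.2 - ((PySem.List.min? (List.map (fun p => p.2) (pvFlood grid (i, j))) fun x => x).getD 0 + r)| ≤ r)) = true ∧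
                  PySem.List.len (pvFlood grid (i, j)) > st.2.1 then
                (st.1.update (pvFlood grid (i, j)), PySem.List.len (pvFlood grid (i, j)),
                  some [(PySem.List.min? (List.map (fun p => p.1) (pvFlood grid (i, j))) fun x => x).getD 0 + r,
                    (PySem.List.min? (List.map (fun p => p.2) (pvFlood grid (i, j))) fun x => x).getD 0 + r])
              else (st.1.update (pvFlood grid (i, j)), st.2.1, st.2.2)
          else st)
        st (PySem.List.pyRange 0 (PySem.List.len (PySem.List.pyGetD grid 0 []))))
    (PySem.List.pyRange 0 (PySem.List.len grid)) [] (PySem.Set.empty, 0, none)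
    (fun cols st i _ h =>
      pvFoldlRel (pvRel grid) _ _ (PySem.List.pyRange 0 (PySem.List.len (PySem.List.pyGetD grid 0 [])))
        cols st (fun cols st j _ h' => pvCellStep grid i j cols st h') h)
    ⟨fun p => by simp [PySem.Set.empty], fun c hc => absurd hc List.not_mem_nil, rfl⟩
  obtain ⟨h1c, h2c, h3c⟩ := hrel
  rw [pvTail_eq _ h2c, ← h3c]
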